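-- pv_equiv track=rewrite | github.com/mistrzegiptu/ASD | evenSubarrayCount.py | count
-- ===== SOURCE A (Python) =====
-- def count(T):
--     n = len(T)
--     cnt = 0
--     Sp = [None]*(n+1)
--     O = [0]*(n+1)
--     E = [0]*(n+1)
--     Sp[0] = 0
--     S = 0
--     for i in range(n):
--         S += T[i]
--         Sp[i+1] = S
--     odd = 0
--     even = 0
--     for j in range(n+1):
--         if Sp[j] % 2 == 0:
--             even += 1
--         else:
--             odd += 1
--         O[j] = odd
--         E[j] = even
--
--     for k in range(n+1):
--         if Sp[k] % 2 == 0: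
--             cnt += E[k]
--         else:
--             cnt += O[k]
--
--     return cnt
-- ===== SOURCE B (Python) =====
-- def count(T):
--     S = 0
--     even = 1  # the empty prefix sum 0 is even
--     odd = 0
--     for t in T:
--         S += t
--         if S % 2 == 0:
--             even += 1
--         else:
--             odd += 1
--     return even * (even + 1) // 2 + odd * (odd + 1) // 2
-- ===== Notes on version B (the rewrite author's own statement) =====
-- stated objective: simpler
-- what changed: Replaced the three array-building loops with a single pass that only counts even and odd prefix sums and returns the closed form e(e+1)/2 + o(o+1)/2 for same-parity pairs.
import Mathlib
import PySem

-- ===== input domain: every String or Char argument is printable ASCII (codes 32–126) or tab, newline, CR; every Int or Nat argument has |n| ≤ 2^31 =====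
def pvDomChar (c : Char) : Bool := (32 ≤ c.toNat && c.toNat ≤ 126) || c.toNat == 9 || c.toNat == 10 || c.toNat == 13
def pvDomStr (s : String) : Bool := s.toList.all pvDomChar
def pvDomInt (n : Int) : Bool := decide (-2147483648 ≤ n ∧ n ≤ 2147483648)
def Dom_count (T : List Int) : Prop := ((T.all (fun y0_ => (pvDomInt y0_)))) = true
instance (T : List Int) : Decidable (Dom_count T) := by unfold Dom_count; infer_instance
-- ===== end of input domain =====

-- B replaces A's three loops and Sp/O/E arrays by a single counting pass plus the
-- closed form e(e+1)/2 + o(o+1)/2 (objective: simpler, O(1) extra space).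

-- ===== PORT A =====
-- prefix-sum loop, then the O/E-array loop, then the counting loop (index k ported
-- as a fold over the zip of the equal-length arrays Sp, E, O)
def count (T : List Int) : Int :=
  let Sp := (T.foldl (fun (p : Int × List Int) t => (p.1 + t, p.2 ++ [p.1 + t])) (0, [(0 : Int)])).2
  let q := Sp.foldl (fun (p : Int × Int × List Int × List Int) s =>
      if PySem.Int.mod s 2 == 0 then
        (p.1, p.2.1 + 1, p.2.2.1 ++ [p.1], p.2.2.2 ++ [p.2.1 + 1])
      else
        (p.1 + 1, p.2.1, p.2.2.1 ++ [p.1 + 1], p.2.2.2 ++ [p.2.1]))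
      ((0 : Int), (0 : Int), ([] : List Int), ([] : List Int))
  (Sp.zip (q.2.2.2.zip q.2.2.1)).foldl (fun cnt p =>
      if PySem.Int.mod p.1 2 == 0 then cnt + p.2.1 else cnt + p.2.2) 0

-- ===== PORT B =====
def count_alt (T : List Int) : Int :=
  let p := T.foldl (fun (p : Int × Int × Int) t =>
      let S := p.1 + t
      if PySem.Int.mod S 2 == 0 then (S, p.2.1 + 1, p.2.2) else (S, p.2.1, p.2.2 + 1))
      ((0 : Int), (1 : Int), (0 : Int))
  PySem.Int.floordiv (p.2.1 * (p.2.1 + 1)) 2 + PySem.Int.floordiv (p.2.2 * (p.2.2 + 1)) 2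

-- ===== PRECONDITION & SPEC =====
def Spec_count (T : List Int) (out : Int) : Prop := out = count_alt T
instance (T : List Int) (out : Int) : Decidable (Spec_count T out) := by unfold Spec_count; infer_instance

-- ===== CLAIM (what is proved, stated in full; the proofs are below) =====
def Claim_equal_count : Prop := ∀ (T : List Int), Dom_count T → Spec_count T (count T)

-- ===== LEMMAS AND PROOFS =====

-- prefix sums of T starting from running sum S
def pfx : Int → List Int → List Int
  | _, [] => []
  | S, t :: ts => (S + t) :: pfx (S + t) ts

def evN : List Int → Int
  | [] => 0
  | s :: L => (if PySem.Int.mod s 2 == 0 then 1 else 0) + evN L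

def odN : List Int → Int
  | [] => 0
  | s :: L => (if PySem.Int.mod s 2 == 0 then 0 else 1) + odN L

def Cc (m : Int) : Int := PySem.Int.floordiv (m * (m + 1)) 2

-- the O and E arrays A's second loop builds, from initial counters o e
def OE : Int → Int → List Int → List Int × List Int
  | _, _, [] => ([], [])
  | o, e, s :: L =>
    if PySem.Int.mod s 2 == 0 then
      let r := OE o (e + 1) L
      (o :: r.1, (e + 1) :: r.2)
    else
      let r := OE (o + 1) e L
      ((o + 1) :: r.1, e :: r.2)

-- what A's third loop adds, from counters o e
def cnt3 : Int → Int → List Int → Int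
  | _, _, [] => 0
  | o, e, s :: L =>
    if PySem.Int.mod s 2 == 0 then (e + 1) + cnt3 o (e + 1) L
    else (o + 1) + cnt3 (o + 1) e L

theorem pfx_fold (T : List Int) : ∀ (S : Int) (acc : List Int),
    (T.foldl (fun (p : Int × List Int) t => (p.1 + t, p.2 ++ [p.1 + t])) (S, acc)).2
      = acc ++ pfx S T := by
  induction T with
  | nil => simp [pfx]
  | cons t ts ih => intro S acc; simp [List.foldl, pfx, ih]

theorem fold2A (L : List Int) : ∀ (o e : Int) (O E : List Int),
    (L.foldl (fun (p : Int × Int × List Int × List Int) s =>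
      if PySem.Int.mod s 2 == 0 then
        (p.1, p.2.1 + 1, p.2.2.1 ++ [p.1], p.2.2.2 ++ [p.2.1 + 1])
      else
        (p.1 + 1, p.2.1, p.2.2.1 ++ [p.1 + 1], p.2.2.2 ++ [p.2.1])) (o, e, O, E))
      = (o + odN L, e + evN L, O ++ (OE o e L).1, E ++ (OE o e L).2) := by
  induction L with
  | nil => intro o e O E; simp [odN, evN, OE]
  | cons s L ih =>
    intro o e O E
    rcases Bool.eq_false_or_eq_true (PySem.Int.mod s 2 == 0) with hc | hc <;>
      simp only [List.foldl_cons, OE, odN, evN, hc, if_false, if_true, Bool.false_eq_true, ih,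
        List.append_assoc, List.cons_append, List.nil_append,
        Prod.mk.injEq, and_true] <;>
      constructor <;> ring

theorem fold3 (L : List Int) : ∀ (o e c : Int),
    ((L.zip ((OE o e L).2.zip (OE o e L).1)).foldl (fun cnt p =>
        if PySem.Int.mod p.1 2 == 0 then cnt + p.2.1 else cnt + p.2.2) c)
      = c + cnt3 o e L := by
  induction L with
  | nil => intro o e c; simp [OE, cnt3]
  | cons s L ih =>
    intro o e c
    rcases Bool.eq_false_or_eq_true (PySem.Int.mod s 2 == 0) with hc | hc <;>
      simp only [OE, cnt3, hc, if_false, if_true, Bool.false_eq_true, List.zip_cons_cons,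
        List.foldl_cons, ih] <;> ring

theorem Cc_succ (e : Int) : Cc (e + 1) = Cc e + (e + 1) := by
  unfold Cc
  rw [PySem.Int.floordiv_eq_ediv_of_pos (by norm_num : (0:Int) < 2),
      PySem.Int.floordiv_eq_ediv_of_pos (by norm_num : (0:Int) < 2)]
  have h2 : (e + 1) * (e + 1 + 1) = e * (e + 1) + 2 * (e + 1) := by ring
  rw [h2]
  obtain ⟨m, hm⟩ := Int.even_mul_succ_self e
  rw [hm]
  omega

theorem cnt3_closed (L : List Int) : ∀ (o e : Int),
    cnt3 o e L = (Cc (e + evN L) - Cc e) + (Cc (o + odN L) - Cc o) := by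
  induction L with
  | nil => intro o e; simp [cnt3, evN, odN]
  | cons s L ih =>
    intro o e
    rcases Bool.eq_false_or_eq_true (PySem.Int.mod s 2 == 0) with hc | hc <;>
      simp only [cnt3, evN, odN, hc, if_false, if_true, Bool.false_eq_true, ih]
    · have h1 : e + ((1:Int) + evN L) = (e + 1) + evN L := by ring
      have h2 : o + ((0:Int) + odN L) = o + odN L := by ring
      rw [h1, h2]
      have := Cc_succ e
      omega
    · have h1 : e + ((0:Int) + evN L) = e + evN L := by ring
      have h2 : o + ((1:Int) + odN L) = (o + 1) + odN L := by ring
      rw [h1, h2]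
      have := Cc_succ o
      omega

theorem fold2B (T : List Int) : ∀ (S e o : Int),
    (T.foldl (fun (p : Int × Int × Int) t =>
      let S := p.1 + t
      if PySem.Int.mod S 2 == 0 then (S, p.2.1 + 1, p.2.2) else (S, p.2.1, p.2.2 + 1))
      (S, e, o)).2
      = (e + evN (pfx S T), o + odN (pfx S T)) := by
  induction T with
  | nil => intro S e o; simp [pfx, evN, odN]
  | cons t ts ih =>
    intro S e o
    rcases Bool.eq_false_or_eq_true (PySem.Int.mod (S + t) 2 == 0) with hc | hc <;>
      simp only [List.foldl_cons, pfx, evN, odN, hc, if_false, if_true, Bool.false_eq_true, ih,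
        Prod.mk.injEq] <;>
      constructor <;> ring

theorem count_eq (T : List Int) : count T = Cc (evN (0 :: pfx 0 T)) + Cc (odN (0 :: pfx 0 T)) := by
  simp only [count]
  rw [pfx_fold]
  simp only [List.singleton_append]
  rw [fold2A]
  simp only [List.nil_append]
  rw [fold3, cnt3_closed]
  simp only [zero_add]
  have hc0 : Cc 0 = 0 := by decide
  omega

theorem count_alt_eq (T : List Int) :
    count_alt T = Cc (1 + evN (pfx 0 T)) + Cc (odN (pfx 0 T)) := by
  simp only [count_alt]
  rw [fold2B]
  simp [Cc]

-- ===== VERDICT (by name: the statement is the Claim_ definition above) =====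
theorem count_spec : Claim_equal_count := by
  intro T _
  unfold Spec_count
  rw [count_eq, count_alt_eq]
  have hc : (PySem.Int.mod (0:Int) 2 == 0) = true := by decide
  have h0 : evN (0 :: pfx 0 T) = 1 + evN (pfx 0 T) := by
    simp only [evN, hc, if_true]
  have h1 : odN (0 :: pfx 0 T) = odN (pfx 0 T) := by
    simp only [odN, hc, if_true, zero_add]
  rw [h0, h1]
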